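-- pv_equiv track=rewrite | github.com/pypi-data/pypi-mirror-401 | packages/arthexis/arthexis-0.2.0.tar.gz/arthexis-0.2.0/apps/screens/lcd_screen.py | _parse_channel_order
-- ===== SOURCE A (Python) =====
-- def _parse_channel_order(text: str) -> list[str]:
--     channels: list[str] = []
--     for raw_line in text.splitlines():
--         line = raw_line.split("#", 1)[0]
--         if not line.strip():
--             continue
--         for token in line.replace(",", " ").split():
--             normalized = token.strip().lower()
--             if not normalized:
--                 continue
--             channels.append(normalized)
--     return channels
-- ===== SOURCE B (Python) =====
-- def _parse_channel_order(text: str) -> list[str]: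
--     # One-pass character scanner: an explicit comment/token state machine
--     # instead of the splitlines/replace/split string-library pipeline.
--     out: list[str] = []
--     cur: list[str] = []
--     in_comment = False
--     for ch in text:
--         if ch == "\n" or ch == "\r":
--             if cur:
--                 out.append("".join(cur))
--                 cur = []
--             in_comment = False
--         elif in_comment:
--             continue
--         elif ch == "#":
--             if cur:
--                 out.append("".join(cur))
--                 cur = []
--             in_comment = True
--         elif ch == "," or ch.isspace():
--             if cur:
--                 out.append("".join(cur))
--                 cur = []
--         else:
--             cur.append(ch.lower())
--     if cur:
--         out.append("".join(cur))
--     return out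
-- ===== Notes on version B (the rewrite author's own statement) =====
-- stated objective: alternative
-- what changed: Replaces A's string-library pipeline (splitlines, per-line comment split, comma replacement, split(), per-token strip/lower) with a single left-to-right character scan: an explicit state machine with an in-comment flag and a current-token buffer that flushes the buffered token at separator, comment and line-break characters and lowercases characters as they are buffered.
import Mathlib
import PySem

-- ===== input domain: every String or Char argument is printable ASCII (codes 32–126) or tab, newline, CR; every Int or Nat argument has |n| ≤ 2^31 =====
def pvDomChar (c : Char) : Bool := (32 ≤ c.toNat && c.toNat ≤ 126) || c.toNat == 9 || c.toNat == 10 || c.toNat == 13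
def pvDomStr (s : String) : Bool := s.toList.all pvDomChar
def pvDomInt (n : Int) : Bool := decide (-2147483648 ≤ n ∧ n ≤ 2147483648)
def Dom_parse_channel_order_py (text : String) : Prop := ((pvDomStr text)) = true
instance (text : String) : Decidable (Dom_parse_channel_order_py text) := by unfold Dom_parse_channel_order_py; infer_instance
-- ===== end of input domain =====

-- B replaces A's string-library pipeline (splitlines, per-line comment split, comma replacement, split,
-- per-token strip+lower) with a single left-to-right character scan: an explicit state machine with an
-- in-comment flag and a current-token buffer; objective: alternative (same cost, different algorithm).

-- ===== PORT A =====
def parse_channel_order_py (text : String) : List String :=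
  (PySem.Str.splitlines text).foldl
    (fun channels raw_line =>
      -- line.split("#", 1)[0]: the separator "#" is nonempty so splitMax? is `some`,
      -- and Python's split never returns an empty list, so [0] is its head
      let line := ((PySem.Str.splitMax? raw_line "#" 1).getD []).headD ""
      if PySem.Str.strip line = "" then channels
      else
        (PySem.Str.split₀ (PySem.Str.replace line "," " ")).foldl
          (fun channels token =>
            let normalized := PySem.Str.lower (PySem.Str.strip token)
            if normalized = "" then channels else channels ++ [normalized])
          channels)
    []

-- ===== PORT B =====
-- one-pass scanner over the characters; state = (emitted tokens, current token buffer, in-comment flag)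
def parse_channel_order_py_alt (text : String) : List String :=
  let fin := text.toList.foldl
    (fun (st : List String × List Char × Bool) ch =>
      if ch = '\n' ∨ ch = '\r' then
        ((if st.2.1.isEmpty then st.1 else st.1 ++ [String.ofList st.2.1]), [], false)
      else if st.2.2 then st
      else if ch = '#' then
        ((if st.2.1.isEmpty then st.1 else st.1 ++ [String.ofList st.2.1]), [], true)
      else if ch = ',' ∨ PySem.Chars.isspace ch then
        ((if st.2.1.isEmpty then st.1 else st.1 ++ [String.ofList st.2.1]), [], false)
      else (st.1, st.2.1 ++ [PySem.Chars.lowerChar ch], st.2.2))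
    ([], [], false)
  if fin.2.1.isEmpty then fin.1 else fin.1 ++ [String.ofList fin.2.1]

-- ===== PRECONDITION & SPEC =====
def Spec_parse_channel_order_py (text : String) (out : List String) : Prop := out = parse_channel_order_py_alt text
instance (text : String) (out : List String) : Decidable (Spec_parse_channel_order_py text out) := by unfold Spec_parse_channel_order_py; infer_instance

-- ===== CLAIM (what is proved, stated in full; the proofs are below) =====
def Claim_equal_parse_channel_order_py : Prop := ∀ (text : String), Dom_parse_channel_order_py text → Spec_parse_channel_order_py text (parse_channel_order_py text)

-- ===== LEMMAS AND PROOFS =====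

-- ---- proof-side helper definitions ----

-- comma→space replacement, characterwise
def pvRC (c : Char) : Char := if c = ',' then ' ' else c
-- the per-character normalization B performs on kept characters
def pvPhi (c : Char) : Char := PySem.Chars.lowerChar (pvRC c)
-- comment excision as a two-state recursion over the raw characters
def pvE : Bool → List Char → List Char
  | _, [] => []
  | false, c :: l => if c = '#' then pvE true l else c :: pvE false l
  | true, c :: l => if c = '\n' ∨ c = '\r' then c :: pvE false l else pvE true l
-- flushing a (reversed) token buffer, as split₀.go does at a space / at the end
def pvFlush (cur : List Char) : List (List Char) := if cur.isEmpty then [] else [cur.reverse]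
-- tokens contributed by one source line
def pvTok (L : List Char) : List (List Char) :=
  PySem.Chars.split₀ (List.map pvPhi (L.takeWhile (· != '#')))
-- tokens of a list of lines, with a pending (reversed) token buffer threaded into the first line
def pvH : List (List Char) → List Char → List (List Char)
  | [], cur => pvFlush cur
  | L :: Ls, cur =>
      PySem.Chars.split₀.go (List.map pvPhi (L.takeWhile (· != '#'))) cur [] ++ (Ls.map pvTok).flatten
-- Python splitlines' line-break test (copied from PySem.Chars.splitlines)
def pvIsB (c : Char) : Bool :=
  have n := c.toNat
  decide (n = 10) || decide (n = 13) || decide (n = 11) || decide (n = 12) || decide (n = 28) || decide (n = 29) ||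
          decide (n = 30) ||
        decide (n = 133) ||
      decide (n = 8232) ||
    decide (n = 8233)
-- head of raw_line.split('#', 1)
def pvClean (l : List Char) : List Char := ((PySem.Chars.splitMax? l ['#'] 1).getD []).headD []
-- A's per-line loop body
def pvABody (ch : List String) (l : List Char) : List String :=
  if PySem.Chars.strip l = [] then ch
  else
    (PySem.Chars.split₀ (PySem.Chars.replace l [','] [' '])).foldl
      (fun ch t =>
        if PySem.Chars.lower (PySem.Chars.strip t) = [] then ch
        else ch ++ [String.ofList (PySem.Chars.lower (PySem.Chars.strip t))]) ch

-- ---- basic Char facts on the domain ----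

lemma char_eq_of_toNat (a b : Char) (h : a.toNat = b.toNat) : a = b := by
  apply Char.ext; exact UInt32.toNat_inj.mp h

lemma isspace_false_of (c : Char) (h1 : 33 ≤ c.toNat) (h2 : c.toNat ≤ 126) :
    PySem.Chars.isspace c = false := by
  simp only [PySem.Chars.isspace, Bool.or_eq_false_iff, Bool.and_eq_false_iff,
    decide_eq_false_iff_not]
  omega

lemma isupper_bounds (c : Char) (h : PySem.Chars.isupper c = true) :
    65 ≤ c.toNat ∧ c.toNat ≤ 90 := by
  simp only [PySem.Chars.isupper, Bool.and_eq_true, decide_eq_true_eq, Char.le_def,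
    UInt32.le_iff_toNat_le] at h
  exact h

lemma toNat_lowered (c : Char) (h : PySem.Chars.isupper c = true) :
    (Char.ofNat (c.toNat + 32)).toNat = c.toNat + 32 := by
  obtain ⟨h1, h2⟩ := isupper_bounds c h
  rw [Char.toNat_ofNat, if_pos (Or.inl (by omega))]

lemma isspace_lowerChar (c : Char) :
    PySem.Chars.isspace (PySem.Chars.lowerChar c) = PySem.Chars.isspace c := by
  unfold PySem.Chars.lowerChar
  by_cases hu : PySem.Chars.isupper c = true
  · obtain ⟨h1, h2⟩ := isupper_bounds c hu
    have ht := toNat_lowered c hu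
    rw [if_pos hu, isspace_false_of _ (by omega) (by omega),
      isspace_false_of c (by omega) (by omega)]
  · simp [hu]

lemma isspace_phi (c : Char) :
    PySem.Chars.isspace (pvPhi c) = (c = ',' ∨ PySem.Chars.isspace c : Bool) := by
  unfold pvPhi pvRC
  by_cases hc' : c = ','
  · subst hc'; simp; decide
  · simp [hc', isspace_lowerChar]

lemma pvIsB_normal (c : Char) (hc : pvDomChar c = true) (hn : ¬ c = '\n') (hr : ¬ c = '\r') :
    pvIsB c = false := by
  have h10 : c.toNat ≠ 10 := fun e => hn (char_eq_of_toNat c '\n' (by simpa using e))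
  have h13 : c.toNat ≠ 13 := fun e => hr (char_eq_of_toNat c '\r' (by simpa using e))
  simp only [pvDomChar, Bool.or_eq_true, Bool.and_eq_true, decide_eq_true_eq, beq_iff_eq,
    Nat.le_iff_lt_or_eq] at hc
  simp only [pvIsB, Bool.or_eq_false_iff, decide_eq_false_iff_not]
  omega

-- ---- split₀.go step lemmas ----

lemma split₀_go_acc (s cur acc) :
    PySem.Chars.split₀.go s cur acc = acc.reverse ++ PySem.Chars.split₀.go s cur [] := by
  induction s generalizing cur acc with
  | nil => simp [PySem.Chars.split₀.go]; split_ifs <;> simp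
  | cons c rest ih =>
    simp only [PySem.Chars.split₀.go]
    split_ifs with h1 h2
    · rw [ih [] acc, ih [] ([] : List (List Char))]
    · rw [ih [] (cur.reverse :: acc), ih [] [cur.reverse]]; simp
    · rw [ih (c :: cur) acc, ih (c :: cur) ([] : List (List Char))]

lemma split₀_go_nil (cur) : PySem.Chars.split₀.go [] cur [] = pvFlush cur := by
  simp only [PySem.Chars.split₀.go, pvFlush]; split_ifs <;> simp

lemma split₀_go_space (c xs cur) (h : PySem.Chars.isspace c = true) :
    PySem.Chars.split₀.go (c :: xs) cur [] = pvFlush cur ++ PySem.Chars.split₀.go xs [] [] := by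
  simp only [PySem.Chars.split₀.go, h, if_true, pvFlush]
  split_ifs with h1 <;> simp_all [split₀_go_acc xs [] [cur.reverse]]

lemma split₀_go_nonspace (c xs cur acc) (h : PySem.Chars.isspace c = false) :
    PySem.Chars.split₀.go (c :: xs) cur acc = PySem.Chars.split₀.go xs (c :: cur) acc := by
  simp [PySem.Chars.split₀.go, h]

lemma split₀_go_pull (xs cur)
    (h : xs = [] ∨ ∃ c xs', xs = c :: xs' ∧ PySem.Chars.isspace c = true) :
    PySem.Chars.split₀.go xs cur [] = pvFlush cur ++ PySem.Chars.split₀.go xs [] [] := by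
  rcases h with h | ⟨c, xs', rfl, hc⟩
  · subst h; simp [split₀_go_nil, pvFlush]
  · rw [split₀_go_space _ _ _ hc, split₀_go_space _ _ _ hc]; simp [pvFlush]

-- ---- splitlines facts ----

lemma splitlines_eq_go (s : List Char) :
    PySem.Chars.splitlines s = PySem.Chars.splitlines.go pvIsB s [] [] := rfl

lemma slgo_nil (isB cur acc) :
    PySem.Chars.splitlines.go isB [] cur acc =
      if cur.isEmpty then acc.reverse else (cur.reverse :: acc).reverse := rfl

lemma slgo_crlf (isB rest cur acc) :
    PySem.Chars.splitlines.go isB ('\r' :: '\n' :: rest) cur acc =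
      PySem.Chars.splitlines.go isB rest [] (cur.reverse :: acc) := rfl

lemma slgo_cons (isB : Char → Bool) (c : Char) (rest cur acc)
    (h : ¬(c = '\r' ∧ ∃ r', rest = '\n' :: r')) :
    PySem.Chars.splitlines.go isB (c :: rest) cur acc =
      if isB c then PySem.Chars.splitlines.go isB rest [] (cur.reverse :: acc)
      else PySem.Chars.splitlines.go isB rest (c :: cur) acc := by
  rw [PySem.Chars.splitlines.go.eq_def]
  split
  · simp_all
  · rename_i heq
    injection heq with h1 h2
    exact absurd ⟨h1, _, h2⟩ h
  · rename_i heq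
    injection heq with h1 h2
    subst h1; subst h2
    rfl

lemma slgo_acc (n : Nat) (s : List Char) (hs : s.length ≤ n) (isB : Char → Bool) (cur acc) :
    PySem.Chars.splitlines.go isB s cur acc =
      acc.reverse ++ PySem.Chars.splitlines.go isB s cur [] := by
  induction n generalizing s cur acc with
  | zero =>
    have : s = [] := by cases s <;> simp_all
    subst this
    rw [slgo_nil, slgo_nil]; split_ifs <;> simp
  | succ n ih =>
    rcases s with _ | ⟨c, rest⟩
    · rw [slgo_nil, slgo_nil]; split_ifs <;> simp
    · by_cases hcr : c = '\r' ∧ ∃ r', rest = '\n' :: r'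
      · obtain ⟨hc, r', hr⟩ := hcr
        subst hc; subst hr
        have hr' : r'.length ≤ n := by simp at hs; omega
        rw [slgo_crlf, slgo_crlf,
          ih r' hr' [] (cur.reverse :: acc),
          ih r' hr' [] [cur.reverse]]
        simp
      · rw [slgo_cons isB c rest cur acc hcr, slgo_cons isB c rest cur [] hcr]
        have hrest : rest.length ≤ n := by simpa using Nat.le_of_succ_le_succ (by simpa using hs)
        split_ifs with hb
        · rw [ih rest hrest [] (cur.reverse :: acc), ih rest hrest [] [cur.reverse]]
          simp
        · rw [ih rest hrest (c :: cur) acc, ih rest hrest (c :: cur) []]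

lemma slgo_cur (n : Nat) (s : List Char) (hs : s.length ≤ n) (isB : Char → Bool) (cur : List Char)
    (hcur : ¬ cur = []) :
    PySem.Chars.splitlines.go isB s cur [] =
      (cur.reverse ++ (PySem.Chars.splitlines.go isB s [] []).headD []) ::
        (PySem.Chars.splitlines.go isB s [] []).tail := by
  induction n generalizing s cur with
  | zero =>
    have : s = [] := by cases s <;> simp_all
    subst this
    rw [slgo_nil, slgo_nil]
    simp [hcur]
  | succ n ih =>
    rcases s with _ | ⟨c, rest⟩
    · rw [slgo_nil, slgo_nil]; simp [hcur]
    · have hrest : rest.length ≤ n := by simpa using Nat.le_of_succ_le_succ (by simpa using hs)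
      by_cases hcr : c = '\r' ∧ ∃ r', rest = '\n' :: r'
      · obtain ⟨hc, r', hr⟩ := hcr
        subst hc; subst hr
        have hr' : r'.length ≤ n := by simp at hs; omega
        rw [slgo_crlf, slgo_crlf,
          slgo_acc n r' hr' isB [] [cur.reverse], slgo_acc n r' hr' isB [] [List.reverse []]]
        simp
      · rw [slgo_cons isB c rest cur [] hcr, slgo_cons isB c rest [] [] hcr]
        split_ifs with hb
        · rw [slgo_acc n rest hrest isB [] [cur.reverse],
            slgo_acc n rest hrest isB [] [List.reverse []]]
          simp
        · rw [ih rest hrest (c :: cur) (by simp), ih rest hrest [c] (by simp)]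
          simp

lemma splitlines_nil : PySem.Chars.splitlines ([] : List Char) = [] := rfl

lemma splitlines_lf (l : List Char) :
    PySem.Chars.splitlines ('\n' :: l) = [] :: PySem.Chars.splitlines l := by
  rw [splitlines_eq_go, splitlines_eq_go,
    slgo_cons pvIsB '\n' l [] [] (by simp), if_pos (by decide),
    slgo_acc l.length l le_rfl pvIsB [] [List.reverse []]]
  simp

lemma splitlines_crlf (l : List Char) :
    PySem.Chars.splitlines ('\r' :: '\n' :: l) = [] :: PySem.Chars.splitlines l := by
  rw [splitlines_eq_go, splitlines_eq_go, slgo_crlf,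
    slgo_acc l.length l le_rfl pvIsB [] [List.reverse []]]
  simp

lemma splitlines_cr (l : List Char) (h : ∀ r', l ≠ '\n' :: r') :
    PySem.Chars.splitlines ('\r' :: l) = [] :: PySem.Chars.splitlines l := by
  rw [splitlines_eq_go, splitlines_eq_go,
    slgo_cons pvIsB '\r' l [] [] (by rintro ⟨-, r', rfl⟩; exact h r' rfl), if_pos (by decide),
    slgo_acc l.length l le_rfl pvIsB [] [List.reverse []]]
  simp

lemma splitlines_normal (c : Char) (l : List Char) (hc : pvDomChar c = true)
    (hn : ¬ c = '\n') (hr : ¬ c = '\r') :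
    PySem.Chars.splitlines (c :: l) =
      (c :: (PySem.Chars.splitlines l).headD []) :: (PySem.Chars.splitlines l).tail := by
  rw [splitlines_eq_go, splitlines_eq_go,
    slgo_cons pvIsB c l [] [] (by rintro ⟨rfl, -⟩; exact hr rfl),
    if_neg (by simp [pvIsB_normal c hc hn hr]),
    slgo_cur l.length l le_rfl pvIsB [c] (by simp)]
  simp

-- ---- pvClean = takeWhile (· != '#') ----

lemma splitOnMax_go_zero (sep : List Char) (n : Nat) (l cur acc) :
    PySem.Chars.splitOnMax.go sep n 0 l cur acc = ((cur.reverse ++ l) :: acc).reverse := by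
  rcases n with _ | n <;> rcases l with _ | ⟨c, rest⟩ <;>
    rw [PySem.Chars.splitOnMax.go.eq_def] <;> simp

lemma splitOnMax_go_head (fuel : Nat) (l cur : List Char) (h : l.length < fuel) :
    (PySem.Chars.splitOnMax.go ['#'] fuel 1 l cur []).headD [] =
      cur.reverse ++ l.takeWhile (· != '#') := by
  induction fuel generalizing l cur with
  | zero => omega
  | succ n ih =>
    rcases l with _ | ⟨c, rest⟩
    · rw [PySem.Chars.splitOnMax.go.eq_def]; simp
    · rw [PySem.Chars.splitOnMax.go.eq_def]
      simp only [List.isPrefixOf, Bool.and_true]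
      by_cases hc : c = '#'
      · subst hc
        simp only [beq_self_eq_true, if_true, if_neg (by omega : ¬ (1 : Nat) = 0)]
        rw [show (1 - 1 : Nat) = 0 from rfl, splitOnMax_go_zero]
        simp [List.takeWhile]
      · have hb : ('#' == c) = false := by simp [beq_eq_false_iff_ne]; exact fun e => hc e.symm
        simp only [hb, Bool.false_eq_true, if_false, if_neg (by omega : ¬ (1 : Nat) = 0)]
        rw [ih rest (c :: cur) (by simpa using Nat.lt_of_succ_lt_succ h)]
        have hne : (c != '#') = true := by simp [bne_iff_ne, hc]
        simp [List.takeWhile, hne]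

lemma pvClean_eq (l : List Char) : pvClean l = l.takeWhile (· != '#') := by
  unfold pvClean PySem.Chars.splitMax? PySem.Chars.splitOnMax
  rw [if_neg (by simp), Option.getD_some, if_neg (by omega : ¬ (1 : Int) < 0)]
  have := splitOnMax_go_head (l.length + 1) l [] (by omega)
  simpa using this

-- ---- A-side characterization (per-line flatten form) ----

lemma mem_split₀_go (s cur acc) (t : List Char)
    (hacc : ∀ u ∈ acc, u ≠ [] ∧ ∀ c ∈ u, PySem.Chars.isspace c = false)
    (hcur : ∀ c ∈ cur, PySem.Chars.isspace c = false)
    (ht : t ∈ PySem.Chars.split₀.go s cur acc) :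
    t ≠ [] ∧ ∀ c ∈ t, PySem.Chars.isspace c = false := by
  induction s generalizing cur acc with
  | nil =>
    simp only [PySem.Chars.split₀.go] at ht
    split_ifs at ht with h
    · exact hacc t (by simpa using ht)
    · simp only [List.mem_reverse, List.mem_cons] at ht
      rcases ht with h1 | h1
      · subst h1
        have hne : cur ≠ [] := fun e => h (by simp [e])
        refine ⟨by simpa using hne, fun c hc => hcur c (by simpa using hc)⟩
      · exact hacc t h1
  | cons c rest ih =>
    simp only [PySem.Chars.split₀.go] at ht
    split_ifs at ht with h1 h2
    · exact ih [] acc hacc (by simp) ht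
    · refine ih [] (cur.reverse :: acc) ?_ (by simp) ht
      intro u hu
      rcases List.mem_cons.mp hu with h3 | h3
      · subst h3
        have hne : cur ≠ [] := fun e => h2 (by simp [e])
        exact ⟨by simpa using hne, fun d hd => hcur d (by simpa using hd)⟩
      · exact hacc u h3
    · refine ih (c :: cur) acc hacc ?_ ht
      intro d hd
      rcases List.mem_cons.mp hd with h3 | h3
      · subst h3; simpa using h1
      · exact hcur d h3

lemma mem_split₀ (s t : List Char) (ht : t ∈ PySem.Chars.split₀ s) :
    t ≠ [] ∧ ∀ c ∈ t, PySem.Chars.isspace c = false :=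
  mem_split₀_go s [] [] t (by simp) (by simp) ht

lemma dropWhile_of_all_false {p : Char → Bool} {l : List Char}
    (h : ∀ c ∈ l, p c = false) : List.dropWhile p l = l := by
  cases l with
  | nil => rfl
  | cons c t => simp [List.dropWhile, h c (by simp)]

lemma strip_of_no_space {t : List Char} (h : ∀ c ∈ t, PySem.Chars.isspace c = false) :
    PySem.Chars.strip t = t := by
  unfold PySem.Chars.strip PySem.Chars.lstrip PySem.Chars.rstrip
  rw [dropWhile_of_all_false h, dropWhile_of_all_false (fun c hc => h c (by simpa using hc))]
  simp

lemma all_space_of_strip_nil {l : List Char} (h : PySem.Chars.strip l = []) :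
    ∀ c ∈ l, PySem.Chars.isspace c = true := by
  induction l with
  | nil => simp
  | cons c t ih =>
    by_cases hc : PySem.Chars.isspace c = true
    · have h2 : PySem.Chars.strip t = [] := by
        unfold PySem.Chars.strip PySem.Chars.lstrip at h ⊢
        simpa [List.dropWhile, hc] using h
      intro d hd
      rcases List.mem_cons.mp hd with h3 | h3
      · subst h3; exact hc
      · exact ih h2 d h3
    · exfalso
      unfold PySem.Chars.strip PySem.Chars.lstrip PySem.Chars.rstrip at h
      rw [show List.dropWhile PySem.Chars.isspace (c :: t) = c :: t by
        simp [List.dropWhile, Bool.eq_false_iff.mpr hc]] at h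
      have := congrArg List.length h
      simp [List.dropWhile_eq_nil_iff] at this
      exact hc (this c (Or.inr rfl))

lemma split₀_go_all_space (s acc) (h : ∀ c ∈ s, PySem.Chars.isspace c = true) :
    PySem.Chars.split₀.go s [] acc = acc.reverse := by
  induction s generalizing acc with
  | nil => simp [PySem.Chars.split₀.go]
  | cons c rest ih =>
    simp only [PySem.Chars.split₀.go, h c (by simp), if_true, List.isEmpty_nil]
    exact ih acc (fun d hd => h d (by simp [hd]))

lemma split₀_all_space (s) (h : ∀ c ∈ s, PySem.Chars.isspace c = true) :
    PySem.Chars.split₀ s = [] := by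
  simpa [PySem.Chars.split₀] using split₀_go_all_space s [] h

lemma inner_foldl (x : List Char) (ch : List String) :
    (PySem.Chars.split₀ x).foldl
      (fun ch t =>
        if PySem.Chars.lower (PySem.Chars.strip t) = [] then ch
        else ch ++ [String.ofList (PySem.Chars.lower (PySem.Chars.strip t))]) ch
    = ch ++ (PySem.Chars.split₀ x).map (fun t => String.ofList (PySem.Chars.lower t)) := by
  rw [PySem.List.foldl_congr_mem (PySem.Chars.split₀ x) _
      (fun ch t => ch ++ [String.ofList (PySem.Chars.lower t)]) ch ?_]
  · generalize PySem.Chars.split₀ x = ts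
    induction ts generalizing ch with
    | nil => simp
    | cons a t ih => simp [ih]
  · intro acc t ht
    obtain ⟨hne, hns⟩ := mem_split₀ x t ht
    rw [strip_of_no_space hns]
    have : ¬ PySem.Chars.lower t = [] := by
      simp [PySem.Chars.lower]; exact hne
    simp [this]

lemma replace_go_comma (fuel : Nat) (s acc : List Char) (h : s.length ≤ fuel) :
    PySem.Chars.replace.go [','] [' '] fuel s acc = acc.reverse ++ s.map pvRC := by
  induction fuel generalizing s acc with
  | zero =>
    have : s = [] := by cases s <;> simp_all
    subst this; simp [PySem.Chars.replace.go]
  | succ n ih =>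
    cases s with
    | nil => simp [PySem.Chars.replace.go]
    | cons c t =>
      simp only [PySem.Chars.replace.go]
      split_ifs with hp
      · have hc : c = ',' := by have := hp; simp [List.isPrefixOf] at this; exact this.symm
        subst hc
        rw [ih _ _ (by simpa using Nat.le_of_succ_le_succ h)]
        simp [pvRC]
      · have hc : ¬ c = ',' := by have := hp; simp [List.isPrefixOf] at this; exact fun e => this e.symm
        rw [ih _ _ (by simpa using Nat.le_of_succ_le_succ h)]
        simp [pvRC, hc]

lemma replace_comma (s : List Char) :
    PySem.Chars.replace s [','] [' '] = s.map pvRC := by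
  simpa [PySem.Chars.replace] using replace_go_comma s.length s [] le_rfl

lemma pvA_fold (cs : List (List Char)) (ch : List String) :
    cs.foldl pvABody ch
      = ch ++ (cs.map (fun l => (PySem.Chars.split₀ (List.map pvRC l)).map
          (fun t => String.ofList (PySem.Chars.lower t)))).flatten := by
  induction cs generalizing ch with
  | nil => simp
  | cons l rest ih =>
    have hbody : pvABody ch l
        = ch ++ (PySem.Chars.split₀ (List.map pvRC l)).map
            (fun t => String.ofList (PySem.Chars.lower t)) := by
      unfold pvABody
      split_ifs with h
      · have hall := all_space_of_strip_nil h
        have hmap : List.map pvRC l = l := by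
          have : List.map pvRC l = List.map id l := by
            apply List.map_congr_left
            intro c hc
            have hne : ¬ c = ',' := by
              intro e; subst e; exact absurd (hall _ hc) (by decide)
            simp [pvRC, hne]
          simpa using this
        rw [hmap, split₀_all_space l hall]
        simp
      · rw [replace_comma, inner_foldl]
    simp only [List.foldl_cons, List.map_cons, List.flatten_cons]
    rw [ih, hbody, List.append_assoc]

lemma ofList_eq_empty_iff (x : List Char) : String.ofList x = "" ↔ x = [] := by
  constructor
  · intro h; have := congrArg String.toList h; simpa using this
  · intro h; subst h; rfl

lemma clean_ofList (l : List Char) :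
    ((PySem.Str.splitMax? (String.ofList l) "#" 1).getD []).headD "" = String.ofList (pvClean l) := by
  unfold pvClean
  rw [show PySem.Str.splitMax? (String.ofList l) "#" 1
      = Option.map (List.map String.ofList) (PySem.Chars.splitMax? l ['#'] 1) by
    simp [PySem.Str.splitMax?]]
  cases h : PySem.Chars.splitMax? l ['#'] 1 with
  | none => simp
  | some xs => cases xs <;> simp

lemma A_eq (text : String) :
    parse_channel_order_py text
      = ((PySem.Chars.splitlines text.toList).map pvClean).foldl pvABody [] := by
  unfold parse_channel_order_py
  rw [show PySem.Str.splitlines text = (PySem.Chars.splitlines text.toList).map String.ofList from rfl]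
  rw [List.foldl_map, List.foldl_map]
  apply PySem.List.foldl_congr_mem
  intro ch l _
  rw [clean_ofList]
  simp only [PySem.Str.strip, String.toList_ofList]
  simp only [ofList_eq_empty_iff]
  unfold pvABody
  split_ifs with h
  · rfl
  · rw [show PySem.Str.split₀ (PySem.Str.replace (String.ofList (pvClean l)) "," " ")
        = (PySem.Chars.split₀ (PySem.Chars.replace (pvClean l) [','] [' '])).map String.ofList by
      simp [PySem.Str.split₀, PySem.Str.replace]]
    rw [List.foldl_map]
    apply PySem.List.foldl_congr_mem
    intro acc t _
    simp [PySem.Str.lower, String.toList_ofList]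

-- ---- lowercase commutes with split₀ ----

lemma split₀_go_map_lower (xs : List Char) (cur : List Char) (acc : List (List Char)) :
    PySem.Chars.split₀.go (xs.map PySem.Chars.lowerChar) (cur.map PySem.Chars.lowerChar)
        (acc.map (List.map PySem.Chars.lowerChar))
      = (PySem.Chars.split₀.go xs cur acc).map (List.map PySem.Chars.lowerChar) := by
  induction xs generalizing cur acc with
  | nil =>
    simp only [List.map_nil, PySem.Chars.split₀.go, List.isEmpty_map]
    split_ifs <;> simp [List.map_reverse]
  | cons c rest ih =>
    simp only [List.map_cons, PySem.Chars.split₀.go, isspace_lowerChar, List.isEmpty_map]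
    split_ifs with h1 h2
    · exact ih [] acc
    · have := ih [] (cur.reverse :: acc)
      simpa [List.map_reverse] using this
    · exact ih (c :: cur) acc

lemma split₀_map_lower (xs : List Char) :
    PySem.Chars.split₀ (xs.map PySem.Chars.lowerChar)
      = (PySem.Chars.split₀ xs).map (List.map PySem.Chars.lowerChar) := by
  have := split₀_go_map_lower xs [] []
  simpa [PySem.Chars.split₀] using this

-- ---- pvE facts ----

lemma pvE_true_head (l : List Char) :
    pvE true l = [] ∨ ∃ c r, pvE true l = c :: r ∧ (c = '\n' ∨ c = '\r') := by
  induction l with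
  | nil => exact Or.inl rfl
  | cons c l ih =>
    by_cases h : c = '\n' ∨ c = '\r'
    · exact Or.inr ⟨c, pvE false l, by simp [pvE, h], h⟩
    · simpa [pvE, h] using ih

-- ---- mini-lemmas about pvH ----

lemma pvH_nil_cur (ls : List (List Char)) : pvH ls [] = (ls.map pvTok).flatten := by
  cases ls with
  | nil => simp [pvH, pvFlush]
  | cons L Ls => simp [pvH, pvTok, PySem.Chars.split₀]

lemma pvH_head_tail (ls : List (List Char)) (cur : List Char) :
    pvH ls cur =
      PySem.Chars.split₀.go (List.map pvPhi ((ls.headD []).takeWhile (· != '#'))) cur [] ++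
        (ls.tail.map pvTok).flatten := by
  cases ls with
  | nil => simp [pvH, split₀_go_nil]
  | cons L Ls => rfl

-- ---- the master correspondence: excised scan vs splitlines normal form ----

lemma master (n : Nat) : ∀ (l : List Char), l.length ≤ n → (∀ c ∈ l, pvDomChar c = true) →
    ∀ (cur : List Char),
      (PySem.Chars.split₀.go (List.map pvPhi (pvE false l)) cur [] =
        pvH (PySem.Chars.splitlines l) cur) ∧
      (PySem.Chars.split₀.go (List.map pvPhi (pvE true l)) cur [] =
        pvFlush cur ++ (((PySem.Chars.splitlines l).tail).map pvTok).flatten) := by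
  induction n with
  | zero =>
    intro l hl _ cur
    have : l = [] := by cases l <;> simp_all
    subst this
    refine ⟨?_, ?_⟩ <;> simp [pvE, split₀_go_nil, splitlines_nil, pvH]
  | succ n ih =>
    intro l hl hdom cur
    rcases l with _ | ⟨c, l'⟩
    · refine ⟨?_, ?_⟩ <;> simp [pvE, split₀_go_nil, splitlines_nil, pvH]
    · have hdc : pvDomChar c = true := hdom c (by simp)
      have hdom' : ∀ d ∈ l', pvDomChar d = true := fun d hd => hdom d (by simp [hd])
      have hl' : l'.length ≤ n := by simp at hl; omega
      by_cases hn : c = '\n'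
      · subst hn
        refine ⟨?_, ?_⟩
        · rw [show pvE false ('\n' :: l') = '\n' :: pvE false l' by simp [pvE],
            List.map_cons, show pvPhi '\n' = '\n' by decide,
            split₀_go_space _ _ _ (by decide), (ih l' hl' hdom' []).1,
            splitlines_lf, pvH_nil_cur]
          simp [pvH, split₀_go_nil]
        · rw [show pvE true ('\n' :: l') = '\n' :: pvE false l' by simp [pvE],
            List.map_cons, show pvPhi '\n' = '\n' by decide,
            split₀_go_space _ _ _ (by decide), (ih l' hl' hdom' []).1,
            splitlines_lf, pvH_nil_cur]
          simp
      · by_cases hr : c = '\r'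
        · subst hr
          rcases l' with _ | ⟨d, l''⟩
          · refine ⟨?_, ?_⟩
            · rw [show List.map pvPhi (pvE false ['\r']) = ['\r'] from by decide,
                split₀_go_space _ _ _ (by decide), split₀_go_nil,
                splitlines_cr [] (fun r' h => by cases h), splitlines_nil]
              simp [pvH, pvFlush, split₀_go_nil]
            · rw [show List.map pvPhi (pvE true ['\r']) = ['\r'] from by decide,
                split₀_go_space _ _ _ (by decide), split₀_go_nil,
                splitlines_cr [] (fun r' h => by cases h), splitlines_nil]
              simp [pvFlush]
          · by_cases hd : d = '\n'
            · subst hd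
              have hl'' : l''.length ≤ n := by simp at hl; omega
              have hdom'' : ∀ e ∈ l'', pvDomChar e = true := fun e he => hdom' e (by simp [he])
              refine ⟨?_, ?_⟩
              · rw [show pvE false ('\r' :: '\n' :: l'') = '\r' :: '\n' :: pvE false l'' by
                    simp [pvE],
                  List.map_cons, List.map_cons, show pvPhi '\r' = '\r' by decide,
                  show pvPhi '\n' = '\n' by decide,
                  split₀_go_space _ _ _ (by decide), split₀_go_space _ _ _ (by decide),
                  (ih l'' hl'' hdom'' []).1, splitlines_crlf, pvH_nil_cur]
                simp [pvH, split₀_go_nil, pvFlush]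
              · rw [show pvE true ('\r' :: '\n' :: l'') = '\r' :: '\n' :: pvE false l'' by
                    simp [pvE],
                  List.map_cons, List.map_cons, show pvPhi '\r' = '\r' by decide,
                  show pvPhi '\n' = '\n' by decide,
                  split₀_go_space _ _ _ (by decide), split₀_go_space _ _ _ (by decide),
                  (ih l'' hl'' hdom'' []).1, splitlines_crlf, pvH_nil_cur]
                simp [pvFlush]
            · have hcr : ∀ r', (d :: l'') ≠ '\n' :: r' := by
                intro r' h
                rw [List.cons.injEq] at h
                exact hd h.1
              refine ⟨?_, ?_⟩
              · rw [show pvE false ('\r' :: d :: l'') = '\r' :: pvE false (d :: l'') by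
                    simp [pvE],
                  List.map_cons, show pvPhi '\r' = '\r' by decide,
                  split₀_go_space _ _ _ (by decide), (ih (d :: l'') hl' hdom' []).1,
                  splitlines_cr (d :: l'') hcr, pvH_nil_cur]
                simp [pvH, split₀_go_nil]
              · rw [show pvE true ('\r' :: d :: l'') = '\r' :: pvE false (d :: l'') by
                    simp [pvE],
                  List.map_cons, show pvPhi '\r' = '\r' by decide,
                  split₀_go_space _ _ _ (by decide), (ih (d :: l'') hl' hdom' []).1,
                  splitlines_cr (d :: l'') hcr, pvH_nil_cur]
                simp
        · -- c is not a line break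
          by_cases hh : c = '#'
          · subst hh
            refine ⟨?_, ?_⟩
            · rw [show pvE false ('#' :: l') = pvE true l' by simp [pvE],
                split₀_go_pull _ _ ?_, (ih l' hl' hdom' []).2,
                splitlines_normal '#' l' hdc hn hr]
              · simp [pvH, List.takeWhile, split₀_go_nil, pvFlush]
              · rcases pvE_true_head l' with h | ⟨c0, r0, he, hc0⟩
                · left; simp [h]
                · right
                  refine ⟨pvPhi c0, (r0.map pvPhi), by simp [he], ?_⟩
                  rcases hc0 with h | h <;> subst h <;> decide
            · rw [show pvE true ('#' :: l') = pvE true l' by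
                  simp [pvE, hn, hr],
                (ih l' hl' hdom' cur).2, splitlines_normal '#' l' hdc hn hr]
              simp
          · refine ⟨?_, ?_⟩
            · rw [show pvE false (c :: l') = c :: pvE false l' by simp [pvE, hh],
                List.map_cons]
              by_cases hsp : PySem.Chars.isspace (pvPhi c) = true
              · rw [split₀_go_space _ _ _ hsp, (ih l' hl' hdom' []).1,
                  splitlines_normal c l' hdc hn hr, pvH_head_tail (PySem.Chars.splitlines l') []]
                have hcr : (c != '#') = true := by simp [bne_iff_ne, hh]
                simp [pvH, List.takeWhile, hcr, split₀_go_space _ _ _ hsp, pvFlush]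
              · rw [split₀_go_nonspace _ _ _ _ (by simpa using hsp),
                  (ih l' hl' hdom' (pvPhi c :: cur)).1,
                  splitlines_normal c l' hdc hn hr,
                  pvH_head_tail (PySem.Chars.splitlines l') (pvPhi c :: cur)]
                have hcr : (c != '#') = true := by simp [bne_iff_ne, hh]
                simp [pvH, List.takeWhile, hcr,
                  split₀_go_nonspace _ _ _ _ (by simpa using hsp)]
            · rw [show pvE true (c :: l') = pvE true l' by simp [pvE, hn, hr],
                (ih l' hl' hdom' cur).2, splitlines_normal c l' hdc hn hr]
              simp

-- ---- the DFA (port B) computes the excised scan ----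

lemma flush_ofList (out : List String) (cur : List Char) :
    (if cur.isEmpty then out else out ++ [String.ofList cur])
      = out ++ (pvFlush cur.reverse).map String.ofList := by
  unfold pvFlush
  rcases cur with _ | ⟨c, cur⟩ <;> simp

lemma map_phi_E_true_head (l : List Char) :
    List.map pvPhi (pvE true l) = [] ∨
      ∃ c xs', List.map pvPhi (pvE true l) = c :: xs' ∧ PySem.Chars.isspace c = true := by
  rcases pvE_true_head l with h | ⟨c0, r0, he, hc0⟩
  · left; simp [h]
  · right
    refine ⟨pvPhi c0, r0.map pvPhi, by simp [he], ?_⟩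
    rcases hc0 with h | h <;> subst h <;> decide

-- B's fold step and finalizer, named for the proofs
def pvStep (st : List String × List Char × Bool) (ch : Char) : List String × List Char × Bool :=
  if ch = '\n' ∨ ch = '\r' then
    ((if st.2.1.isEmpty then st.1 else st.1 ++ [String.ofList st.2.1]), [], false)
  else if st.2.2 then st
  else if ch = '#' then
    ((if st.2.1.isEmpty then st.1 else st.1 ++ [String.ofList st.2.1]), [], true)
  else if ch = ',' ∨ PySem.Chars.isspace ch then
    ((if st.2.1.isEmpty then st.1 else st.1 ++ [String.ofList st.2.1]), [], false)
  else (st.1, st.2.1 ++ [PySem.Chars.lowerChar ch], st.2.2)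

def pvFin (st : List String × List Char × Bool) : List String :=
  if st.2.1.isEmpty then st.1 else st.1 ++ [String.ofList st.2.1]

lemma dfa_eq (l : List Char) :
    ∀ (out : List String) (cur : List Char),
      (pvFin (l.foldl pvStep (out, cur, false))
        = out ++ (PySem.Chars.split₀.go (List.map pvPhi (pvE false l)) cur.reverse []).map
            String.ofList) ∧
      (pvFin (l.foldl pvStep (out, [], true))
        = out ++ (PySem.Chars.split₀.go (List.map pvPhi (pvE true l)) [] []).map String.ofList) := by
  induction l with
  | nil =>
    intro out cur
    constructor
    · rw [List.foldl_nil, show pvE false [] = [] from rfl, List.map_nil, split₀_go_nil,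
        pvFin, flush_ofList]
    · rw [List.foldl_nil, show pvE true [] = [] from rfl, List.map_nil, split₀_go_nil]
      simp [pvFin, pvFlush]
  | cons c l' ih =>
    intro out cur
    simp only [List.foldl_cons]
    constructor
    · by_cases hbr : c = '\n' ∨ c = '\r'
      · have hphi : pvPhi c = c := by rcases hbr with h | h <;> subst h <;> decide
        have hsp : PySem.Chars.isspace c = true := by
          rcases hbr with h | h <;> subst h <;> decide
        rw [show pvStep (out, cur, false) c
            = ((if cur.isEmpty then out else out ++ [String.ofList cur]), [], false) by
          simp [pvStep, hbr]]
        rw [(ih (if cur.isEmpty then out else out ++ [String.ofList cur]) []).1]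
        rw [show pvE false (c :: l') = c :: pvE false l' by
            rcases hbr with h | h <;> subst h <;> simp [pvE],
          List.map_cons, hphi, split₀_go_space _ _ _ hsp, flush_ofList]
        simp
      · by_cases hh : c = '#'
        · subst hh
          rw [show pvStep (out, cur, false) '#'
              = ((if cur.isEmpty then out else out ++ [String.ofList cur]), [], true) by
            simp [pvStep]]
          rw [(ih (if cur.isEmpty then out else out ++ [String.ofList cur]) []).2]
          rw [show pvE false ('#' :: l') = pvE true l' by simp [pvE],
            split₀_go_pull (List.map pvPhi (pvE true l')) cur.reverse (map_phi_E_true_head l'),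
            flush_ofList]
          simp [pvFlush]
        · by_cases hsp : c = ',' ∨ PySem.Chars.isspace c = true
          · rw [show pvStep (out, cur, false) c
                = ((if cur.isEmpty then out else out ++ [String.ofList cur]), [], false) by
              unfold pvStep
              rw [if_neg hbr, if_neg (by simp), if_neg hh, if_pos hsp]]
            rw [(ih (if cur.isEmpty then out else out ++ [String.ofList cur]) []).1]
            have hphis : PySem.Chars.isspace (pvPhi c) = true := by
              rw [isspace_phi]; simpa using hsp
            rw [show pvE false (c :: l') = c :: pvE false l' by simp [pvE, hh],
              List.map_cons, split₀_go_space _ _ _ hphis, flush_ofList]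
            simp
          · have hc' : ¬ c = ',' := fun e => hsp (Or.inl e)
            have hns : ¬ PySem.Chars.isspace c = true := fun e => hsp (Or.inr e)
            rw [show pvStep (out, cur, false) c
                = (out, cur ++ [PySem.Chars.lowerChar c], false) by
              simp [pvStep, hbr, hh, hc', hns]]
            have hphis : PySem.Chars.isspace (pvPhi c) = false := by
              rw [isspace_phi]; simp [hc', hns]
            have hphi : pvPhi c = PySem.Chars.lowerChar c := by simp [pvPhi, pvRC, hc']
            rw [show pvE false (c :: l') = c :: pvE false l' by simp [pvE, hh],
              List.map_cons, split₀_go_nonspace _ _ _ _ hphis]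
            have := (ih out (cur ++ [PySem.Chars.lowerChar c])).1
            simp only [List.reverse_append, List.reverse_cons, List.reverse_nil,
              List.nil_append, List.singleton_append] at this
            rw [hphi]
            exact this
    · by_cases hbr : c = '\n' ∨ c = '\r'
      · have hphi : pvPhi c = c := by rcases hbr with h | h <;> subst h <;> decide
        have hsp : PySem.Chars.isspace c = true := by
          rcases hbr with h | h <;> subst h <;> decide
        rw [show pvStep (out, [], true) c = (out, [], false) by simp [pvStep, hbr]]
        rw [(ih out []).1]
        rw [show pvE true (c :: l') = c :: pvE false l' by simp [pvE, hbr],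
          List.map_cons, hphi, split₀_go_space _ _ _ hsp]
        simp [pvFlush]
      · rw [show pvStep (out, [], true) c = (out, [], true) by simp [pvStep, hbr]]
        rw [(ih out []).2]
        rw [show pvE true (c :: l') = pvE true l' by simp [pvE, hbr]]

-- ---- assembly ----

lemma B_eq (text : String) :
    parse_channel_order_py_alt text
      = (PySem.Chars.split₀.go (List.map pvPhi (pvE false text.toList)) [] []).map String.ofList := by
  have h := (dfa_eq text.toList [] []).1
  have hB : parse_channel_order_py_alt text
      = pvFin (text.toList.foldl pvStep ([], [], false)) := rfl
  rw [hB, h]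
  simp

lemma line_conv (L : List Char) :
    (PySem.Chars.split₀ (List.map pvRC (pvClean L))).map
        (fun t => String.ofList (PySem.Chars.lower t))
      = (pvTok L).map String.ofList := by
  rw [pvClean_eq]
  unfold pvTok
  rw [show List.map pvPhi (L.takeWhile (· != '#'))
      = List.map PySem.Chars.lowerChar (List.map pvRC (L.takeWhile (· != '#'))) by
    rw [List.map_map]; rfl]
  rw [split₀_map_lower, List.map_map]
  rfl

lemma A_flat (text : String) :
    parse_channel_order_py text
      = (pvH (PySem.Chars.splitlines text.toList) []).map String.ofList := by
  rw [A_eq, pvA_fold, pvH_nil_cur]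
  simp only [List.nil_append, List.map_map, List.map_flatten]
  congr 1
  exact List.map_congr_left (fun L _ => line_conv L)

-- ===== VERDICT (by name: the statement is the Claim_ definition above) =====
theorem parse_channel_order_py_spec : Claim_equal_parse_channel_order_py := by
  intro text hdom
  unfold Spec_parse_channel_order_py
  have h : ∀ c ∈ text.toList, pvDomChar c = true := by
    intro c hc
    have := hdom
    unfold Dom_parse_channel_order_py pvDomStr at this
    exact List.all_eq_true.mp this c hc
  rw [A_flat text, B_eq text,
    (master text.toList.length text.toList le_rfl h []).1]
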